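-- pv_equiv track=rewrite | github.com/HARISMUGHAL/Stock_Predictor | fusion_api.py | fix_features
-- ===== SOURCE A (Python) =====
-- def fix_features(input_dict):
--     arr = [0] * 14
--     i = 0
--     for _, v in input_dict.items():
--         if i < 14:
--             arr[i] = v
--             i += 1
--     return arr
-- ===== SOURCE B (Python) =====
-- def fix_features(input_dict):
--     vals = list(input_dict.values())[:14]
--     return vals + [0] * (14 - len(vals))
-- ===== Notes on version B (the rewrite author's own statement) =====
-- stated objective: simpler
-- what changed: B slices the first fourteen dict values and explicitly pads with zeros to length fourteen, replacing A's preallocated zero buffer overwritten by an index-guarded loop.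
import Mathlib
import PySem

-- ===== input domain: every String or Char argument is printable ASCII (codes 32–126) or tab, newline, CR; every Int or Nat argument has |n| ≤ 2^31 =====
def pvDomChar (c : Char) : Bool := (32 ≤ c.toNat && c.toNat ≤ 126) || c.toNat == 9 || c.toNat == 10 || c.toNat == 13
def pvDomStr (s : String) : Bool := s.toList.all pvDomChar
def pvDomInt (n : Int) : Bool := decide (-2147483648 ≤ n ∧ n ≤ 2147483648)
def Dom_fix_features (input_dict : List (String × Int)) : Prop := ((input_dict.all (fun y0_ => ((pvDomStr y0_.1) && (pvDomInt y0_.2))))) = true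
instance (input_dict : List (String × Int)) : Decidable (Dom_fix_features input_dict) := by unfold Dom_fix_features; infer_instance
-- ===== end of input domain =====

-- B builds the first-14-values slice and pads it with zeros explicitly, instead of
-- A's preallocated [0]*14 buffer overwritten by an index-guarded loop (simpler decomposition).

-- ===== PORT A =====
-- arr = [0]*14; i = 0; for _, v in items: if i < 14: arr[i] = v; i += 1; return arr
def fix_features (input_dict : List (String × Int)) : List Int :=
  let arr : List Int := List.replicate 14 0
  (input_dict.foldl
    (fun (s : List Int × Nat) kv =>
      if s.2 < 14 then (s.1.set s.2 kv.2, s.2 + 1) else s)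
    (arr, 0)).1

-- ===== PORT B =====
-- vals = list(input_dict.values())[:14]; return vals + [0]*(14 - len(vals))
def fix_features_alt (input_dict : List (String × Int)) : List Int :=
  let vals := (input_dict.map Prod.snd).take 14
  vals ++ List.replicate (14 - vals.length) 0

-- ===== PRECONDITION & SPEC =====
-- The argument is a Python dict, encoded as an association list; Pre_ states the
-- dict invariant that keys are distinct (duplicate-key lists represent no Python input).
def Pre_fix_features (input_dict : List (String × Int)) : Prop :=
  (input_dict.map Prod.fst).Nodup
instance (input_dict : List (String × Int)) : Decidable (Pre_fix_features input_dict) := by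
  unfold Pre_fix_features; infer_instance
def pvWitness_fix_features : (List (String × Int)) := [("open", 3), ("close", -4), ("vol", 100)]

def Spec_fix_features (input_dict : List (String × Int)) (out : List Int) : Prop := out = fix_features_alt input_dict
instance (input_dict : List (String × Int)) (out : List Int) : Decidable (Spec_fix_features input_dict out) := by unfold Spec_fix_features; infer_instance

-- ===== CLAIM (what is proved, stated in full; the proofs are below) =====
def Claim_equal_fix_features : Prop := ∀ (input_dict : List (String × Int)), Dom_fix_features input_dict → Pre_fix_features input_dict → Spec_fix_features input_dict (fix_features input_dict)

-- ===== LEMMAS AND PROOFS =====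

theorem fix_features_loop (l : List (String × Int)) :
    ∀ (arr : List Int) (i : Nat), i ≤ 14 → arr.length = 14 →
    (l.foldl
      (fun (s : List Int × Nat) kv =>
        if s.2 < 14 then (s.1.set s.2 kv.2, s.2 + 1) else s)
      (arr, i)).1
    = arr.take i ++ (l.map Prod.snd).take (14 - i) ++ arr.drop (i + min l.length (14 - i)) := by
  induction l with
  | nil =>
      intro arr i hi hlen
      simp
  | cons kv t ih =>
      intro arr i hi hlen
      by_cases h : i < 14
      · simp only [List.foldl_cons, if_pos h]
        rw [ih (arr.set i kv.2) (i + 1) (by omega) (by simp [hlen])]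
        have hts : (arr.set i kv.2).take (i + 1) = arr.take i ++ [kv.2] := by
          rw [List.set_eq_take_append_cons_drop, if_pos (by omega), List.take_append]
          simp [hlen, List.take_take]
          rw [show i + 1 - min i 14 = 1 by omega]
          simp
        have hds : (arr.set i kv.2).drop (i + 1 + min t.length (14 - (i + 1)))
            = arr.drop (i + min (t.length + 1) (14 - i)) := by
          rw [List.drop_set, if_pos (by omega)]
          congr 1; omega
        have htk : ((kv :: t).map Prod.snd).take (14 - i)
            = kv.2 :: (t.map Prod.snd).take (14 - (i + 1)) := by
          simp only [List.map_cons]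
          rw [show (14 - i) = (14 - (i + 1)) + 1 by omega, List.take_succ_cons]
        rw [hts, hds, htk]
        simp only [List.length_cons]
        rw [show i + min (t.length + 1) (14 - i) = i + 1 + min t.length (14 - (i + 1)) by omega]
        simp
      · have hi14 : i = 14 := by omega
        simp only [List.foldl_cons, if_neg h]
        rw [ih arr i hi hlen]
        subst hi14
        simp

-- ===== VERDICT (by name: the statement is the Claim_ definition above) =====
theorem fix_features_spec : Claim_equal_fix_features := by
  intro input_dict _ _
  unfold Spec_fix_features fix_features fix_features_alt
  rw [fix_features_loop input_dict (List.replicate 14 0) 0 (by omega) (by simp)]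
  simp only [List.take_zero, Nat.zero_add, List.nil_append, Nat.sub_zero,
    List.drop_replicate, List.length_take, List.length_map]
  rw [Nat.min_comm]
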